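-- pv_equiv track=rewrite | github.com/capston-qrcode/qrcode-python | main.py | add_terminator_and_pad
-- ===== SOURCE A (Python) =====
-- def add_terminator_and_pad(encoded_data, total_bits):
--     for _ in range(min(4, total_bits - len(encoded_data))):
--         encoded_data += '0'
--
--     while len(encoded_data) % 8 != 0:
--         encoded_data += '0'
--
--     rest = len(encoded_data) % 8
--     if rest:
--         for _ in range(8 - rest):
--             encoded_data += '0'
--
--     padding_patterns = ['11101100', '00010001']
--     bytes_to_fill = (total_bits - len(encoded_data)) // 8
--     for i in range(bytes_to_fill):
--         encoded_data += padding_patterns[i % 2]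
--     return encoded_data
-- ===== SOURCE B (Python) =====
-- def add_terminator_and_pad(encoded_data, total_bits):
--     data = encoded_data + '0' * min(4, total_bits - len(encoded_data))
--     data += '0' * ((-len(data)) % 8)
--     n = (total_bits - len(data)) // 8
--     return data + ('1110110000010001' * ((n + 1) // 2))[:n * 8]
-- ===== Notes on version B (the rewrite author's own statement) =====
-- stated objective: simpler
-- what changed: A's three char-by-char append loops (terminator zeros, byte-alignment while-loop plus a dead rest-block, alternating pad bytes) are replaced by closed-form counts: '0' * count for the zeros, (-len) % 8 for the alignment, and the alternating pattern produced by repeating a 16-char block and slicing it to n*8 chars.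
import Mathlib
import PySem

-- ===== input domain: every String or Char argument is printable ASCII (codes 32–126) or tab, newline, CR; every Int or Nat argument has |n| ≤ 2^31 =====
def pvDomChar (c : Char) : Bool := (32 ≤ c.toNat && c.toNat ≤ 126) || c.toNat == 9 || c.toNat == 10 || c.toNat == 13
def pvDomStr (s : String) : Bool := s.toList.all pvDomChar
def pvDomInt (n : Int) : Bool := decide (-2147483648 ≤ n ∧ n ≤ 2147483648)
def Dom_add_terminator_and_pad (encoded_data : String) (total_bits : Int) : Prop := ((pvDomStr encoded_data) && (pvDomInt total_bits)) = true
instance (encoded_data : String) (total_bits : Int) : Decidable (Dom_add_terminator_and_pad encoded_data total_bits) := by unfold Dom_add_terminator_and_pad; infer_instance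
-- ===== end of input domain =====

-- B replaces A's three char-by-char append loops by closed-form counts: '0'-padding by string
-- multiplication and the alternating byte pattern by repeating a 16-char block and slicing it;
-- objective: simpler (no speed claim).

-- ===== PORT A =====
-- A's while-loop: append '0' until the length is a multiple of 8.
def pvPadTo8 (s : List Char) : List Char :=
  if s.length % 8 ≠ 0 then pvPadTo8 (s ++ ['0']) else s
termination_by (8 - s.length % 8) % 8
decreasing_by simp only [List.length_append, List.length_cons, List.length_nil]; omega

def add_terminator_and_pad (encoded_data : String) (total_bits : Int) : String :=
  let ed := (PySem.List.pyRange 0 (min 4 (total_bits - PySem.Str.len encoded_data)) 1).foldl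
      (fun s _ => s ++ ['0']) encoded_data.toList
  let ed := pvPadTo8 ed
  let rest : Nat := ed.length % 8
  let ed := if rest ≠ 0 then
      (PySem.List.pyRange 0 (8 - (rest : Int)) 1).foldl (fun s _ => s ++ ['0']) ed
    else ed
  let padding_patterns : List (List Char) := ["11101100".toList, "00010001".toList]
  let bytes_to_fill := PySem.Int.floordiv (total_bits - (ed.length : Int)) 8
  let ed := (PySem.List.pyRange 0 bytes_to_fill 1).foldl
      (fun s i => s ++ (PySem.List.pyGet? padding_patterns (PySem.Int.mod i 2)).getD []) ed
  String.ofList ed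

-- ===== PORT B =====
def add_terminator_and_pad_alt (encoded_data : String) (total_bits : Int) : String :=
  let data := encoded_data.toList ++
      PySem.List.pyRepeat ['0'] (min 4 (total_bits - PySem.Str.len encoded_data))
  let data := data ++ PySem.List.pyRepeat ['0'] (PySem.Int.mod (-(data.length : Int)) 8)
  let n := PySem.Int.floordiv (total_bits - (data.length : Int)) 8
  String.ofList (data ++
    PySem.List.slice
      (PySem.List.pyRepeat "1110110000010001".toList (PySem.Int.floordiv (n + 1) 2))
      none (some (n * 8)))

-- ===== PRECONDITION & SPEC =====
def Spec_add_terminator_and_pad (encoded_data : String) (total_bits : Int) (out : String) : Prop := out = add_terminator_and_pad_alt encoded_data total_bits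
instance (encoded_data : String) (total_bits : Int) (out : String) : Decidable (Spec_add_terminator_and_pad encoded_data total_bits out) := by unfold Spec_add_terminator_and_pad; infer_instance

-- ===== CLAIM (what is proved, stated in full; the proofs are below) =====
def Claim_equal_add_terminator_and_pad : Prop := ∀ (encoded_data : String) (total_bits : Int), Dom_add_terminator_and_pad encoded_data total_bits → Spec_add_terminator_and_pad encoded_data total_bits (add_terminator_and_pad encoded_data total_bits)

-- ===== LEMMAS AND PROOFS =====

-- range(m) for an arbitrary (possibly non-positive) Int bound
theorem pvRange0 (m : Int) : PySem.List.pyRange 0 m 1 = (List.range m.toNat).map (fun k : Nat => (k : Int)) := by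
  rcases le_or_gt m 0 with h | h
  · have h0 : m.toNat = 0 := by omega
    simp [PySem.List.pyRange, h0, show ¬ (0 : Int) < m by omega]
  · obtain ⟨k, rfl⟩ : ∃ k : Nat, m = (k : Int) := ⟨m.toNat, by omega⟩
    rw [Int.toNat_natCast]
    exact PySem.List.pyRange_zero_natCast k

theorem pvZeroLoop (l : List Int) (init : List Char) :
    l.foldl (fun s _ => s ++ ['0']) init = init ++ List.replicate l.length '0' := by
  rw [PySem.List.foldl_append_eq_flatMap (fun _ => ['0']) l init]
  induction l with
  | nil => simp
  | cons a t ih => simpa [List.replicate_succ] using ih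

theorem pvPadTo8_eq (s : List Char) :
    pvPadTo8 s = s ++ List.replicate ((8 - s.length % 8) % 8) '0' := by
  fun_induction pvPadTo8 s with
  | case1 s h ih =>
    rw [ih, List.append_assoc]
    congr 1
    have : ['0'] ++ List.replicate ((8 - (s ++ ['0']).length % 8) % 8) '0'
        = List.replicate ((8 - (s ++ ['0']).length % 8) % 8 + 1) '0' := by
      simp [List.replicate_succ]
    rw [this]
    congr 1
    simp only [List.length_append, List.length_cons, List.length_nil]
    omega
  | case2 s h =>
    have : (8 - s.length % 8) % 8 = 0 := by omega
    simp [this]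

theorem pvFlattenRepLen {α : Type} (k : Nat) (r : List α) :
    ((List.replicate k r).flatten).length = k * r.length := by
  induction k with
  | zero => simp
  | succ k ih => simp [List.replicate_succ, ih, Nat.succ_mul, Nat.add_comm]

-- the alternating-pattern loop equals a sliced repetition of the 16-char block
theorem pvPattern (p0 p1 : List Char) (h0 : p0.length = 8) (h1 : p1.length = 8) (N : Nat) :
    (List.range N).flatMap (fun k => if k % 2 = 0 then p0 else p1)
      = List.take (8 * N) ((List.replicate ((N + 1) / 2) (p0 ++ p1)).flatten) := by
  induction N with
  | zero => simp
  | succ N ih =>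
    rw [List.range_succ, List.flatMap_append, ih]
    have hT8 : List.take 8 (p0 ++ p1) = p0 := by rw [← h0, List.take_left]
    have hT16 : List.take 16 (p0 ++ p1) = p0 ++ p1 := List.take_of_length_le (by simp [h0, h1])
    rcases Nat.even_or_odd N with ⟨k, hk⟩ | ⟨k, hk⟩
    · subst hk
      have hq1 : (k + k + 1 + 1) / 2 = k + 1 := by omega
      have hq0 : (k + k + 1) / 2 = k := by omega
      have hlen : ((List.replicate k (p0 ++ p1)).flatten).length = 16 * k := by
        rw [pvFlattenRepLen]; simp [h0, h1]; omega
      rw [hq1, hq0, List.replicate_succ', List.flatten_append,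
        List.take_of_length_le (i := 8 * (k + k)) (l := (List.replicate k (p0 ++ p1)).flatten) (by omega),
        List.take_append, List.take_of_length_le (i := 8 * (k + k + 1)) (l := (List.replicate k (p0 ++ p1)).flatten) (by omega), hlen]
      simp only [List.flatten_cons, List.flatten_nil, List.append_nil,
        List.flatMap_cons, List.flatMap_nil]
      rw [show 8 * (k + k + 1) - 16 * k = 8 by omega, hT8,
        if_pos (by omega : (k + k) % 2 = 0)]
    · subst hk
      have hq1 : (2 * k + 1 + 1 + 1) / 2 = k + 1 := by omega
      have hq0 : (2 * k + 1 + 1) / 2 = k + 1 := by omega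
      have hlen : ((List.replicate k (p0 ++ p1)).flatten).length = 16 * k := by
        rw [pvFlattenRepLen]; simp [h0, h1]; omega
      rw [hq1, hq0, List.replicate_succ', List.flatten_append,
        List.take_append, List.take_of_length_le (i := 8 * (2 * k + 1)) (l := (List.replicate k (p0 ++ p1)).flatten) (by omega),
        List.take_append, List.take_of_length_le (i := 8 * (2 * k + 1 + 1)) (l := (List.replicate k (p0 ++ p1)).flatten) (by omega), hlen]
      simp only [List.flatten_cons, List.flatten_nil, List.append_nil,
        List.flatMap_cons, List.flatMap_nil]
      rw [show 8 * (2 * k + 1) - 16 * k = 8 by omega,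
        show 8 * (2 * k + 1 + 1) - 16 * k = 16 by omega, hT8, hT16,
        if_neg (by omega : ¬ (2 * k + 1) % 2 = 0), List.append_assoc]

-- Python's (-m) % 8 as a Nat count
theorem pvNegMod (m : Nat) : (PySem.Int.mod (-(m : Int)) 8).toNat = (8 - m % 8) % 8 := by
  rw [PySem.Int.mod_eq_emod_of_pos (by norm_num)]; omega

-- the pattern body of A's last loop, as a function of the Nat loop index
theorem pvBody (k : Nat) :
    (PySem.List.pyGet? (["11101100".toList, "00010001".toList])
        (PySem.Int.mod (k : Int) 2)).getD []
      = (if k % 2 = 0 then "11101100".toList else "00010001".toList) := by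
  have h2 : PySem.Int.mod (k : Int) 2 = ((k % 2 : Nat) : Int) := by
    exact_mod_cast PySem.Int.mod_natCast k 2
  rw [h2]
  rcases Nat.even_or_odd k with ⟨j, hj⟩ | ⟨j, hj⟩
  · rw [show k % 2 = 0 by omega]; decide
  · rw [show k % 2 = 1 by omega]; decide

-- ===== VERDICT (by name: the statement is the Claim_ definition above) =====
theorem add_terminator_and_pad_spec : Claim_equal_add_terminator_and_pad := by
  intro ed t _
  unfold Spec_add_terminator_and_pad add_terminator_and_pad add_terminator_and_pad_alt
  simp only [pvRange0, PySem.List.pyRepeat_singleton, pvZeroLoop, List.length_map,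
    List.length_range, pvPadTo8_eq, pvNegMod]
  refine congrArg String.ofList ?_
  set A1 := ed.toList ++ List.replicate (min 4 (t - PySem.Str.len ed)).toNat '0' with hA1
  set A2 := A1 ++ List.replicate ((8 - A1.length % 8) % 8) '0' with hA2
  have hmod8 : A2.length % 8 = 0 := by
    rw [hA2]; simp only [List.length_append, List.length_replicate]; omega
  rw [if_neg (by omega : ¬ A2.length % 8 ≠ 0)]
  set n := PySem.Int.floordiv (t - (A2.length : Int)) 8 with hn
  rw [PySem.List.foldl_append_eq_flatMap, List.flatMap_map]
  simp only [pvBody]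
  rw [pvPattern _ _ (by decide) (by decide) n.toNat]
  congr 1
  rcases le_or_gt n 0 with hle | hpos
  · have hq : (PySem.Int.floordiv (n + 1) 2).toNat = 0 := by
      rw [PySem.Int.floordiv_eq_ediv_of_pos (by norm_num)]; omega
    rw [show n.toNat = 0 by omega]
    simp only [PySem.List.pyRepeat, hq, List.replicate_zero, List.flatten_nil]
    simp [PySem.List.slice]
  · have hq : (PySem.Int.floordiv (n + 1) 2).toNat = (n.toNat + 1) / 2 := by
      rw [PySem.Int.floordiv_eq_ediv_of_pos (by norm_num)]; omega
    rw [PySem.List.slice_to _ (by omega : (0:Int) ≤ n * 8)]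
    rw [show (n * 8).toNat = 8 * n.toNat by omega]
    simp only [PySem.List.pyRepeat, hq]
    rw [show "1110110000010001".toList = "11101100".toList ++ "00010001".toList by decide]
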